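-- pv_equiv track=rewrite | github.com/anvithamarri/BatteryDiscovery | generation_model/validate.py | classify_intermetallic
-- ===== SOURCE A (Python) =====
-- REFRACTORY = {"W", "Mo", "Ta", "Nb", "Re", "Hf", "Zr", "V", "Cr", "Ti"}
--
-- PRECIOUS   = {"Au", "Ag", "Pt", "Pd", "Ir", "Ru", "Rh"}
--
-- NON_METALS = {
--     "H", "He", "C", "N", "O", "F", "Ne", "P", "S",
--     "Cl", "Ar", "Se", "Br", "Kr", "I", "Xe", "At", "Rn"
-- }
--
-- def classify_intermetallic(symbols):
--     if any(s in NON_METALS for s in symbols):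
--         return None
--
--     if all(s in REFRACTORY for s in symbols):
--         return "Refractory Alloy"
--
--     if any(s in PRECIOUS for s in symbols):
--         return "Precious Metal Intermetallic"
--
--     return "Standard Intermetallic"
-- ===== SOURCE B (Python) =====
-- REFRACTORY = {"W", "Mo", "Ta", "Nb", "Re", "Hf", "Zr", "V", "Cr", "Ti"}
--
-- PRECIOUS   = {"Au", "Ag", "Pt", "Pd", "Ir", "Ru", "Rh"}
--
-- NON_METALS = {
--     "H", "He", "C", "N", "O", "F", "Ne", "P", "S",
--     "Cl", "Ar", "Se", "Br", "Kr", "I", "Xe", "At", "Rn"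
-- }
--
-- # Per-element severity: refractory 0, unknown metal 1, precious 2, non-metal 3.
-- SEVERITY = {}
-- for _s in REFRACTORY:
--     SEVERITY[_s] = 0
-- for _s in PRECIOUS:
--     SEVERITY[_s] = 2
-- for _s in NON_METALS:
--     SEVERITY[_s] = 3
--
-- OUTCOME = ["Refractory Alloy", "Standard Intermetallic",
--            "Precious Metal Intermetallic", None]
--
-- def classify_intermetallic(symbols):
--     sev = 0
--     for s in symbols:
--         sev = max(sev, SEVERITY.get(s, 1))
--     return OUTCOME[sev]
-- ===== Notes on version B (the rewrite author's own statement) =====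
-- stated objective: alternative
-- what changed: Replaces the three branch-ordered any/all set scans with a precomputed per-element severity dictionary (refractory 0, other 1, precious 2, non-metal 3), a single max-fold over the symbols, and a 4-entry outcome table indexed by the maximum severity.
import Mathlib
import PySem

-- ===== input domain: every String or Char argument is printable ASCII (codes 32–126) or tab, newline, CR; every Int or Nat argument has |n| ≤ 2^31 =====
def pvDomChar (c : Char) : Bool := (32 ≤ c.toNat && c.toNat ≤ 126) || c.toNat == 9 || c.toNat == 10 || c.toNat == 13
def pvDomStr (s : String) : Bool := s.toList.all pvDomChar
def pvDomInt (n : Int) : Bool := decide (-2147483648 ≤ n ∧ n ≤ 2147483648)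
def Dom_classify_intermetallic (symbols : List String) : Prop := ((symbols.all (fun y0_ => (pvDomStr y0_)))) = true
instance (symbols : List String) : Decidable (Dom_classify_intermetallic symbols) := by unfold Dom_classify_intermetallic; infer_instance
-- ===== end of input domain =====

-- B maps each symbol to a numeric severity via one precomputed dictionary, folds max over the list, and indexes a 4-entry outcome table, instead of A's three ordered any/all set scans (objective: alternative).


set_option maxRecDepth 40000

-- ===== PORT A =====
def REFRACTORY : PySem.Set String := PySem.Set.ofList ["W", "Mo", "Ta", "Nb", "Re", "Hf", "Zr", "V", "Cr", "Ti"]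
def PRECIOUS : PySem.Set String := PySem.Set.ofList ["Au", "Ag", "Pt", "Pd", "Ir", "Ru", "Rh"]
def NON_METALS : PySem.Set String := PySem.Set.ofList ["H", "He", "C", "N", "O", "F", "Ne", "P", "S", "Cl", "Ar", "Se", "Br", "Kr", "I", "Xe", "At", "Rn"]

def classify_intermetallic (symbols : List String) : Option String :=
  if symbols.any (fun s => PySem.Set.contains NON_METALS s) then none
  else if symbols.all (fun s => PySem.Set.contains REFRACTORY s) then some "Refractory Alloy"
  else if symbols.any (fun s => PySem.Set.contains PRECIOUS s) then some "Precious Metal Intermetallic"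
  else some "Standard Intermetallic"

-- ===== PORT B =====
-- SEVERITY is built by three insert loops over the element sets; the keys are disjoint and the
-- dict is only looked up afterwards, so Python's set iteration order cannot affect any lookup.
def SEVERITY : PySem.Dict String Int :=
  NON_METALS.foldl (fun d s => d.insert s 3)
    (PRECIOUS.foldl (fun d s => d.insert s 2)
      (REFRACTORY.foldl (fun d s => d.insert s 0) PySem.Dict.empty))

def OUTCOME : List (Option String) :=
  [some "Refractory Alloy", some "Standard Intermetallic",
   some "Precious Metal Intermetallic", none]

def classify_intermetallic_alt (symbols : List String) : Option String :=
  let sev := symbols.foldl (fun sev s => max sev (SEVERITY.getD s 1)) 0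
  -- OUTCOME[sev] is exact here: 0 ≤ sev ≤ 3 always, so Python never raises
  PySem.List.pyGetD OUTCOME sev none

-- ===== PRECONDITION & SPEC =====
def Spec_classify_intermetallic (symbols : List String) (out : Option String) : Prop := out = classify_intermetallic_alt symbols
instance (symbols : List String) (out : Option String) : Decidable (Spec_classify_intermetallic symbols out) := by unfold Spec_classify_intermetallic; infer_instance

-- ===== CLAIM (what is proved, stated in full; the proofs are below) =====
def Claim_equal_classify_intermetallic : Prop := ∀ (symbols : List String), Dom_classify_intermetallic symbols → Spec_classify_intermetallic symbols (classify_intermetallic symbols)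

-- ===== LEMMAS AND PROOFS =====

-- per-symbol characterisation of the severity lookup
lemma severity_getD (s : String) :
    SEVERITY.getD s 1 =
      if PySem.Set.contains NON_METALS s then 3
      else if PySem.Set.contains PRECIOUS s then 2
      else if PySem.Set.contains REFRACTORY s then 0
      else 1 := by
  by_cases h1 : s ∈ (["H", "He", "C", "N", "O", "F", "Ne", "P", "S", "Cl", "Ar", "Se", "Br", "Kr", "I", "Xe", "At", "Rn"] : List String)
  · simp only [List.mem_cons, List.not_mem_nil, or_false] at h1
    rcases h1 with rfl|rfl|rfl|rfl|rfl|rfl|rfl|rfl|rfl|rfl|rfl|rfl|rfl|rfl|rfl|rfl|rfl|rfl <;> decide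
  by_cases h2 : s ∈ (["Au", "Ag", "Pt", "Pd", "Ir", "Ru", "Rh"] : List String)
  · simp only [List.mem_cons, List.not_mem_nil, or_false] at h2
    rcases h2 with rfl|rfl|rfl|rfl|rfl|rfl|rfl <;> decide
  by_cases h3 : s ∈ (["W", "Mo", "Ta", "Nb", "Re", "Hf", "Zr", "V", "Cr", "Ti"] : List String)
  · simp only [List.mem_cons, List.not_mem_nil, or_false] at h3
    rcases h3 with rfl|rfl|rfl|rfl|rfl|rfl|rfl|rfl|rfl|rfl <;> decide
  · have hc : SEVERITY.contains s = false := by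
      rw [PySem.Dict.contains_eq_decide_mem_keys]
      simp only [SEVERITY, PySem.Dict.keys_foldl_insert, PySem.Dict.keys_empty, decide_eq_false_iff_not]
      simp only [PySem.Set.mem_update, PySem.Set.update_nil_left]
      push_neg
      refine ⟨⟨?_, ?_⟩, ?_⟩
      · intro hm; exact h3 (by simpa [REFRACTORY, PySem.Set.mem_ofList] using hm)
      · intro hm; exact h2 hm
      · intro hm; exact h1 hm
    rw [PySem.Dict.getD_of_not_contains (h := hc)]
    have m1 : s ∉ NON_METALS := by simpa [NON_METALS, PySem.Set.mem_ofList] using h1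
    have m2 : s ∉ PRECIOUS := by simpa [PRECIOUS, PySem.Set.mem_ofList] using h2
    have m3 : s ∉ REFRACTORY := by simpa [REFRACTORY, PySem.Set.mem_ofList] using h3
    simp [m1, m2, m3]

-- the refractory and precious sets are disjoint
lemma refractory_not_precious (s : String)
    (h : PySem.Set.contains REFRACTORY s = true) :
    PySem.Set.contains PRECIOUS s = false := by
  rw [PySem.Set.contains_iff] at h
  have h' : s ∈ (["W", "Mo", "Ta", "Nb", "Re", "Hf", "Zr", "V", "Cr", "Ti"] : List String) := by
    simpa [REFRACTORY, PySem.Set.mem_ofList] using h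
  simp only [List.mem_cons, List.not_mem_nil, or_false] at h'
  rcases h' with rfl|rfl|rfl|rfl|rfl|rfl|rfl|rfl|rfl|rfl <;> decide

-- the max-fold factors over its accumulator
lemma sev_fold (l : List String) (z : Int) (h0 : 0 ≤ z) :
    l.foldl (fun sev s => max sev (SEVERITY.getD s 1)) z =
      max z (l.foldl (fun sev s => max sev (SEVERITY.getD s 1)) 0) := by
  induction l generalizing z with
  | nil => simp [max_eq_left h0]
  | cons x xs ih =>
    simp only [List.foldl_cons]
    rw [ih (max z (SEVERITY.getD x 1)) (le_max_of_le_left h0),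
        ih (max 0 (SEVERITY.getD x 1)) (le_max_left 0 _)]
    simp only [max_def]
    split_ifs <;> omega

-- the maximum severity, characterised by A's three scans (in B's priority order)
lemma sev_eq (symbols : List String) :
    symbols.foldl (fun sev s => max sev (SEVERITY.getD s 1)) 0 =
      if symbols.any (fun s => PySem.Set.contains NON_METALS s) then 3
      else if symbols.any (fun s => PySem.Set.contains PRECIOUS s) then 2
      else if symbols.all (fun s => PySem.Set.contains REFRACTORY s) then 0
      else 1 := by
  induction symbols with
  | nil => simp
  | cons x xs ih =>
    simp only [List.foldl_cons, List.any_cons, List.all_cons]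
    rw [sev_fold xs (max 0 (SEVERITY.getD x 1)) (le_max_left 0 _), ih, severity_getD x]
    rcases Bool.eq_false_or_eq_true (PySem.Set.contains NON_METALS x) with n1 | n1 <;>
      rcases Bool.eq_false_or_eq_true (PySem.Set.contains PRECIOUS x) with n2 | n2 <;>
        rcases Bool.eq_false_or_eq_true (PySem.Set.contains REFRACTORY x) with n3 | n3 <;>
          simp only [n1, n2, n3, Bool.false_or, Bool.true_or, Bool.false_and,
            Bool.true_and, Bool.false_eq_true, reduceIte] <;>
          simp only [max_def] <;> split_ifs <;> omega

-- ===== VERDICT (by name: the statement is the Claim_ definition above) =====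
theorem classify_intermetallic_spec : Claim_equal_classify_intermetallic := by
  intro symbols _
  unfold Spec_classify_intermetallic classify_intermetallic classify_intermetallic_alt
  rw [sev_eq]
  cases h1 : symbols.any (fun s => PySem.Set.contains NON_METALS s)
  · cases h2 : symbols.all (fun s => PySem.Set.contains REFRACTORY s)
    · cases h3 : symbols.any (fun s => PySem.Set.contains PRECIOUS s)
      · simp only [Bool.false_eq_true, reduceIte]
        decide
      · simp only [Bool.false_eq_true, reduceIte]
        decide
    · have hp : symbols.any (fun s => PySem.Set.contains PRECIOUS s) = false := by
        rw [List.any_eq_false]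
        intro s hs hPC
        have hRF := (List.all_eq_true.mp h2) s hs
        have hf := refractory_not_precious s hRF
        rw [hPC] at hf
        exact absurd hf (by decide)
      simp only [hp, Bool.false_eq_true, reduceIte]
      decide
  · simp only [reduceIte]
    decide
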